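-- pv_equiv track=rewrite | github.com/khuonggminhhoang/PYTHON_PTIT | binh_phuong_nguyen_to_1.py | anlPrime
-- ===== SOURCE A (Python) =====
-- import math
--
-- def anlPrime(n):
--     for i in range(2, math.isqrt(n) + 1):
--         if n % i == 0:
--             cnt = 0
--             while n%i == 0:
--                 cnt += 1
--                 n //= i
--             if cnt > 1: return True
--     return False
-- ===== SOURCE B (Python) =====
-- import math
--
-- def anlPrime(n):
--     # square-divisibility scan: no factoring, no mutation of n
--     return any(n % (i * i) == 0 for i in range(2, math.isqrt(n) + 1))
-- ===== Notes on version B (the rewrite author's own statement) =====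
-- stated objective: simpler
-- what changed: Replaces the factor-out-and-count-multiplicity loop (with inner while and mutation of n) by a single pass that returns whether some i in [2, isqrt(n)] has i*i dividing n; correct because n has a repeated prime factor iff such an i exists.
import Mathlib
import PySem

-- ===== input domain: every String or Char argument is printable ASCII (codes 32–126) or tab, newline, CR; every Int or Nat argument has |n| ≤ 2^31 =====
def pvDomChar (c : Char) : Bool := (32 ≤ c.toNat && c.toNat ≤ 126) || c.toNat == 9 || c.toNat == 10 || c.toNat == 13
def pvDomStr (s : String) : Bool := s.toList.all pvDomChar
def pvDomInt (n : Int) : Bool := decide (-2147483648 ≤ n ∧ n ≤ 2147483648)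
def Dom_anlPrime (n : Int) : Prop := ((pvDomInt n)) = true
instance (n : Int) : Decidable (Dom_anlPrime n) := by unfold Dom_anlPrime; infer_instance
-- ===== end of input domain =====

-- B replaces A's factor-out-and-count loop with a direct square-divisibility scan (simpler; same cost).

-- ===== PORT A =====
-- inner 'while n % i == 0: cnt += 1; n //= i'; the '2 ≤ i ∧ 0 < v' guard only makes the
-- recursion total (every call the surrounding loop makes satisfies it)
def pvDivOut (i : Int) (v : Int) (cnt : Int) : Int × Int :=
  if h : 2 ≤ i ∧ 0 < v ∧ PySem.Int.mod v i = 0 then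
    pvDivOut i (PySem.Int.floordiv v i) (cnt + 1)
  else (cnt, v)
termination_by v.toNat
decreasing_by
  obtain ⟨hi, hv, hm⟩ := h
  have hdvd : i ∣ v := (PySem.Int.mod_eq_zero_iff_dvd v i).mp hm
  rw [PySem.Int.floordiv_eq_ediv_of_pos (by omega)]
  obtain ⟨w, rfl⟩ := hdvd
  have hw : 0 < w := by nlinarith
  rw [Int.mul_ediv_cancel_left _ (by omega : i ≠ 0)]
  have : w < i * w := by nlinarith
  omega

-- 'for i in range(2, isqrt(n)+1): if n % i == 0: …' (early return on cnt > 1)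
def pvLoopA : List Int → Int → Bool
  | [], _ => false
  | i :: rest, v =>
    if PySem.Int.mod v i = 0 then
      let r := pvDivOut i v 0
      if 1 < r.1 then true else pvLoopA rest r.2
    else pvLoopA rest v

def anlPrime (n : Int) : Bool :=
  pvLoopA (PySem.List.pyRange 2 ((Nat.sqrt n.toNat : Int) + 1) 1) n

-- ===== PORT B =====
def anlPrime_alt (n : Int) : Bool :=
  (PySem.List.pyRange 2 ((Nat.sqrt n.toNat : Int) + 1) 1).any
    (fun i => PySem.Int.mod n (i * i) == 0)

-- ===== PRECONDITION & SPEC =====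
-- math.isqrt raises ValueError on negative input, so both programs raise there.
def Pre_anlPrime (n : Int) : Prop := 0 ≤ n
instance (n : Int) : Decidable (Pre_anlPrime n) := by unfold Pre_anlPrime; infer_instance
def pvWitness_anlPrime : Int := (12)

def Spec_anlPrime (n : Int) (out : Bool) : Prop := out = anlPrime_alt n
instance (n : Int) (out : Bool) : Decidable (Spec_anlPrime n out) := by unfold Spec_anlPrime; infer_instance

-- ===== CLAIM (what is proved, stated in full; the proofs are below) =====
def Claim_equal_anlPrime : Prop := ∀ (n : Int), Dom_anlPrime n → Pre_anlPrime n → Spec_anlPrime n (anlPrime n)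

-- ===== LEMMAS AND PROOFS =====

-- the common mathematical content: n has a repeated prime factor
def pvHasSq (n0 : Nat) : Prop := ∃ p : Nat, p.Prime ∧ p * p ∣ n0

lemma pvPrime_le_sqrt (n0 p : Nat) (hn0 : 1 ≤ n0) (hpd : p * p ∣ n0) : p ≤ Nat.sqrt n0 :=
  Nat.le_sqrt.mpr (Nat.le_of_dvd (by omega) hpd)

lemma pvDivOut_aux (i : Int) (hi : 2 ≤ i) :
    ∀ (N : Nat) (v c : Int), 0 < v → v.toNat ≤ N →
      ∃ (k : Nat) (v' : Int), pvDivOut i v c = (c + (k : Int), v') ∧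
        v = i ^ k * v' ∧ 0 < v' ∧ ¬ i ∣ v' := by
  intro N
  induction N with
  | zero => intro v c hv hle; omega
  | succ N ih =>
    intro v c hv hle
    rw [pvDivOut]
    by_cases h : 2 ≤ i ∧ 0 < v ∧ PySem.Int.mod v i = 0
    · have hm := h.2.2
      have hdvd : i ∣ v := (PySem.Int.mod_eq_zero_iff_dvd v i).mp hm
      rw [dif_pos h]
      obtain ⟨w, rfl⟩ := hdvd
      have hw : 0 < w := by nlinarith
      have hfd : PySem.Int.floordiv (i * w) i = w := by
        rw [PySem.Int.floordiv_eq_ediv_of_pos (by omega),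
          Int.mul_ediv_cancel_left _ (by omega : i ≠ 0)]
      obtain ⟨k, v', heq, hfact, hvp, hnd⟩ := ih w (c + 1) hw (by nlinarith [Int.toNat_of_nonneg hw.le, Int.toNat_of_nonneg hv.le]; )
      refine ⟨k + 1, v', ?_, ?_, hvp, hnd⟩
      · rw [hfd, heq]
        have : c + 1 + (k : Int) = c + ((k + 1 : Nat) : Int) := by push_cast; ring
        rw [this]
      · rw [hfact]; ring
    · refine ⟨0, v, ?_, by simp, hv, ?_⟩
      · rw [dif_neg h]; simp
      · intro hdvd
        exact h ⟨hi, hv, (PySem.Int.mod_eq_zero_iff_dvd v i).mpr hdvd⟩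

lemma pvDivOut_spec (i : Int) (hi : 2 ≤ i) (v c : Int) (hv : 0 < v) :
    ∃ (k : Nat) (v' : Int), pvDivOut i v c = (c + (k : Int), v') ∧
      v = i ^ k * v' ∧ 0 < v' ∧ ¬ i ∣ v' :=
  pvDivOut_aux i hi v.toNat v c hv le_rfl

lemma pvAlt_iff (n : Int) (hn : 0 < n) :
    (anlPrime_alt n = true ↔ pvHasSq n.toNat) := by
  unfold anlPrime_alt
  rw [List.any_eq_true]
  constructor
  · rintro ⟨i, hmem, hdiv⟩
    rw [PySem.List.mem_pyRange_one] at hmem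
    obtain ⟨h2, hlt⟩ := hmem
    rw [beq_iff_eq, PySem.Int.mod_eq_zero_iff_dvd] at hdiv
    have hia : i = (i.toNat : Int) := by omega
    have hdN : i.toNat * i.toNat ∣ n.toNat := by
      rw [hia] at hdiv
      rw [show n = (n.toNat : Int) by omega] at hdiv
      exact_mod_cast hdiv
    refine ⟨i.toNat.minFac, Nat.minFac_prime (by omega), ?_⟩
    exact dvd_trans (mul_dvd_mul (Nat.minFac_dvd _) (Nat.minFac_dvd _)) hdN
  · rintro ⟨p, hp, hdvd⟩
    have hple : p ≤ Nat.sqrt n.toNat := pvPrime_le_sqrt n.toNat p (by omega) hdvd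
    refine ⟨(p : Int), ?_, ?_⟩
    · rw [PySem.List.mem_pyRange_one]
      constructor
      · exact_mod_cast hp.two_le
      · have : (p : Int) ≤ (Nat.sqrt n.toNat : Int) := by exact_mod_cast hple
        omega
    · rw [beq_iff_eq, PySem.Int.mod_eq_zero_iff_dvd]
      rw [show n = (n.toNat : Int) by omega]
      exact_mod_cast hdvd

lemma pvLoopA_out (n0 : Nat) (hn0 : 1 ≤ n0) (i : Nat) (v : Int)
    (hge : Nat.sqrt n0 + 1 ≤ i)
    (hsq : ∀ p : Nat, p.Prime → p * p ∣ n0 → i ≤ p) :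
    (pvLoopA (PySem.List.pyRange (i : Int) ((Nat.sqrt n0 : Int) + 1) 1) v = true ↔ pvHasSq n0) := by
  have hempty : PySem.List.pyRange (i : Int) ((Nat.sqrt n0 : Int) + 1) 1 = [] := by
    rw [PySem.List.pyRange_one]
    have : (((Nat.sqrt n0 : Int) + 1) - i).toNat = 0 := by omega
    rw [this]; simp
  rw [hempty]
  simp only [pvLoopA]
  constructor
  · intro h; exact absurd h (by simp)
  · rintro ⟨p, hp, hpd⟩
    have h1 := hsq p hp hpd
    have h2 := pvPrime_le_sqrt n0 p hn0 hpd
    omega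

lemma pvLoopA_spec (n0 : Nat) (hn0 : 1 ≤ n0) :
    ∀ (fuel i : Nat) (v : Int), Nat.sqrt n0 + 1 - i ≤ fuel → 2 ≤ i → 0 < v →
      v.toNat ∣ n0 →
      (∀ j : Nat, 2 ≤ j → j < i → ¬ j ∣ v.toNat) →
      (∀ p : Nat, p.Prime → i ≤ p → ∀ k : Nat, (p ^ k ∣ v.toNat ↔ p ^ k ∣ n0)) →
      (∀ p : Nat, p.Prime → p * p ∣ n0 → i ≤ p) →
      (pvLoopA (PySem.List.pyRange (i : Int) ((Nat.sqrt n0 : Int) + 1) 1) v = true ↔ pvHasSq n0) := by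
  intro fuel
  induction fuel with
  | zero =>
    intro i v hfuel hi hv hdvd hsmall hfac hsq
    exact pvLoopA_out n0 hn0 i v (by omega) hsq
  | succ fuel ih =>
    intro i v hfuel hi hv hdvd hsmall hfac hsq
    by_cases hle : Nat.sqrt n0 + 1 ≤ i
    · exact pvLoopA_out n0 hn0 i v hle hsq
    · have hlt : (i : Int) < (Nat.sqrt n0 : Int) + 1 := by omega
      rw [PySem.List.pyRange_one_cons hlt]
      have hvN : v = (v.toNat : Int) := by omega
      have hcast : ((i : Int) + 1) = ((i + 1 : Nat) : Int) := by push_cast; ring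
      simp only [pvLoopA]
      by_cases hdv : (i : Int) ∣ v
      · have hdnN : i ∣ v.toNat := by rw [hvN] at hdv; exact_mod_cast hdv
        have hiprime : Nat.Prime i := by
          rcases eq_or_lt_of_le (Nat.minFac_le (show 0 < i by omega)) with hEq | hLt
          · exact Nat.prime_def_minFac.mpr ⟨hi, hEq⟩
          · exact absurd (dvd_trans (Nat.minFac_dvd i) hdnN)
              (hsmall i.minFac (Nat.minFac_prime (by omega)).two_le hLt)
        have hmod : PySem.Int.mod v (i : Int) = 0 := (PySem.Int.mod_eq_zero_iff_dvd v _).mpr hdv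
        rw [if_pos hmod]
        obtain ⟨k, v', heq, hfact, hvp, hnd⟩ :=
          pvDivOut_spec (i : Int) (by exact_mod_cast hi) v 0 hv
        rw [heq]
        simp only [zero_add]
        by_cases hk2 : 2 ≤ k
        · have hgt : (1 : Int) < (k : Int) := by exact_mod_cast hk2
          rw [if_pos hgt]
          have hiv : (i : Int) ^ 2 ∣ v := dvd_trans (pow_dvd_pow (i : Int) hk2) ⟨v', hfact⟩
          have hNat : i ^ 2 ∣ v.toNat := by
            have h' : ((i ^ 2 : Nat) : Int) ∣ ((v.toNat : Nat) : Int) := by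
              push_cast
              rw [Int.toNat_of_nonneg hv.le]
              exact_mod_cast hiv
            exact_mod_cast h'
          have hii : i * i ∣ n0 := by
            have := (hfac i hiprime le_rfl 2).mp hNat
            rwa [pow_two] at this
          constructor
          · intro _; exact ⟨i, hiprime, hii⟩
          · intro _; rfl
        · have hk1 : 1 ≤ k := by
            rcases Nat.eq_zero_or_pos k with rfl | h
            · rw [pow_zero, one_mul] at hfact
              exact absurd (hfact ▸ hdv) hnd
            · exact h
          have hk : k = 1 := by omega
          subst hk
          rw [if_neg (by norm_num)]
          have hfact' : v = (i : Int) * v' := by rw [hfact]; ring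
          have h1 : ((i * v'.toNat : Nat) : Int) = v := by
            push_cast
            rw [Int.toNat_of_nonneg hvp.le]
            exact hfact'.symm
          have hvN' : v.toNat = i * v'.toNat := by
            rw [← h1, Int.toNat_natCast]
          have hdvdV : v'.toNat ∣ v.toNat := ⟨i, by rw [hvN']; ring⟩
          rw [hcast]
          apply ih (i + 1) v' (by omega) (by omega) hvp (dvd_trans hdvdV hdvd)
          · intro j h2 hj
            rcases Nat.lt_succ_iff_lt_or_eq.mp hj with h | rfl
            · exact fun hjd => hsmall j h2 h (dvd_trans hjd hdvdV)
            · exact fun hjd => hnd (by rw [show v' = (v'.toNat : Int) by omega]; exact_mod_cast hjd)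
          · intro p hp hip k'
            have hpi : p ≠ i := by omega
            have hcop : Nat.Coprime (p ^ k') i :=
              Nat.Coprime.pow_left k' ((Nat.coprime_primes hp hiprime).mpr hpi)
            constructor
            · intro hd; exact (hfac p hp (by omega) k').mp (dvd_trans hd hdvdV)
            · intro hd
              have h3 := (hfac p hp (by omega) k').mpr hd
              rw [hvN'] at h3
              exact hcop.dvd_of_dvd_mul_left h3
          · intro p hp hpd
            have hip := hsq p hp hpd
            by_cases hpi : p = i
            · exfalso
              subst hpi
              have h3 : p ^ 2 ∣ v.toNat := (hfac p hp le_rfl 2).mpr (by rw [pow_two]; exact hpd)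
              rw [hvN'] at h3
              have h4 : p ∣ v'.toNat := by
                have h5 : p * p ∣ p * v'.toNat := by rw [← pow_two]; exact h3
                exact (Nat.mul_dvd_mul_iff_left (show 0 < p by omega)).mp h5
              exact hnd (by rw [show v' = (v'.toNat : Int) by omega]; exact_mod_cast h4)
            · omega
      · have hmod : ¬ PySem.Int.mod v (i : Int) = 0 :=
          fun hcon => hdv ((PySem.Int.mod_eq_zero_iff_dvd v _).mp hcon)
        rw [if_neg hmod]
        have hndN : ¬ i ∣ v.toNat := fun hcon => hdv (by rw [hvN]; exact_mod_cast hcon)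
        rw [hcast]
        apply ih (i + 1) v (by omega) (by omega) hv hdvd
        · intro j h2 hj
          rcases Nat.lt_succ_iff_lt_or_eq.mp hj with h | rfl
          · exact hsmall j h2 h
          · exact hndN
        · intro p hp hip k'; exact hfac p hp (by omega) k'
        · intro p hp hpd
          have hip := hsq p hp hpd
          by_cases hpi : p = i
          · exfalso
            subst hpi
            apply hndN
            have h2 : p ^ 2 ∣ v.toNat := (hfac p hp le_rfl 2).mpr (by rw [pow_two]; exact hpd)
            exact dvd_trans (dvd_pow_self p (by norm_num)) h2
          · omega

-- ===== VERDICT (by name: the statement is the Claim_ definition above) =====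
theorem anlPrime_spec : Claim_equal_anlPrime := by
  intro n _ hpre
  unfold Spec_anlPrime
  rcases eq_or_lt_of_le hpre with h0 | hpos
  · subst h0; decide
  · have hn0 : 1 ≤ n.toNat := by omega
    have hA := pvLoopA_spec n.toNat hn0 (Nat.sqrt n.toNat + 1) 2 n (by omega) le_rfl hpos
      dvd_rfl
      (by intro j h2 hlt; omega)
      (by intro p hp _ k; rfl)
      (by intro p hp _; exact hp.two_le)
    have hB := pvAlt_iff n hpos
    have h2 : ((2 : Nat) : Int) = (2 : Int) := by norm_num
    rw [h2] at hA
    rw [Bool.eq_iff_iff]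
    exact (hA.trans hB.symm)
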